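-- pv_equiv track=rewrite | github.com/pypi-data/pypi-mirror-347 | packages/bubop/bubop-0.0.0.post1.dev0-py3-none-any.whl/bubop/string.py | camel_case_to_dashed
-- ===== SOURCE A (Python) =====
-- def camel_case_to_dashed(s: str) -> str:
--     """
--     Convert a CamelCase string into the dashed representation.
--
--     >>> camel_case_to_dashed("KalimeraKalinuxta")
--     'kalimera-kalinuxta'
--     >>> camel_case_to_dashed("somethingIsRotten")
--     'something-is-rotten'
--     >>> camel_case_to_dashed("SLAM")
--     'slam'
--     """
--     new_chars: list[str] = []
--     last_char = ""
--     for char in s: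
--         if char.isupper():
--             if not last_char.isupper():
--                 new_chars.append("-")
--             new_chars.append(char.lower())
--         else:
--             new_chars.append(char)
--
--         last_char = char
--     return "".join(new_chars).lstrip("-")
-- ===== SOURCE B (Python) =====
-- from itertools import groupby
--
--
-- def camel_case_to_dashed(s: str) -> str:
--     pieces = []
--     for is_upper, group in groupby(s, key=str.isupper):
--         run = "".join(group)
--         pieces.append("-" + run.lower() if is_upper else run)
--     return "".join(pieces).lstrip("-")
-- ===== Notes on version B (the rewrite author's own statement) =====
-- stated objective: idiomatic
-- what changed: Replaced the stateful per-character loop (tracking the previous char's case) with a run-based pass: groupby splits the string into maximal same-case runs, each uppercase run is emitted as a dash followed by the lowered run, other runs pass through, and leading dashes are stripped at the end.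
import Mathlib
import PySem

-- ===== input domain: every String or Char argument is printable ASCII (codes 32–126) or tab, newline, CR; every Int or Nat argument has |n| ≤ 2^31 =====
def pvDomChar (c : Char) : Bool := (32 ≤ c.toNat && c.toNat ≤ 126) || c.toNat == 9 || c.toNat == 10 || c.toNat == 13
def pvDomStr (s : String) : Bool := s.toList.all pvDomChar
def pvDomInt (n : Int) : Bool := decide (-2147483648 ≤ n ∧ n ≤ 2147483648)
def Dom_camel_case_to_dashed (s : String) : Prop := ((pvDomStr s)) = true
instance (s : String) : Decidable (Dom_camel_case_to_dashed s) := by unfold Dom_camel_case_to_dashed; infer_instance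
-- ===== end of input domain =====

-- B replaces A's stateful per-character loop with a run-based (groupby) pass; objective: idiomatic, same cost.

-- exact port of Python s.lstrip("-"): drop leading '-' characters
def pvLstripDash (cs : List Char) : List Char := cs.dropWhile (· == '-')

-- ===== PORT A =====
-- A's for-loop: new_chars is the accumulator, last_char is carried as 'was the previous char uppercase'
-- ("" at the start: "".isupper() is False)
def camelLoopA : List Char → List Char → Bool → List Char
  | [], acc, _ => acc
  | c :: rest, acc, lastUp =>
    if PySem.Chars.isupper c then
      camelLoopA rest ((if lastUp then acc else acc ++ ['-']) ++ [PySem.Chars.lowerChar c]) (PySem.Chars.isupper c)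
    else
      camelLoopA rest (acc ++ [c]) (PySem.Chars.isupper c)

def camel_case_to_dashed (s : String) : String :=
  String.ofList (pvLstripDash (camelLoopA s.toList [] false))

-- ===== PORT B =====
-- itertools.groupby(s, key=str.isupper): maximal runs of equal key, in order
def camelRunsB : List Char → List (Bool × List Char)
  | [] => []
  | c :: rest =>
    let k := PySem.Chars.isupper c
    (k, c :: rest.takeWhile (fun x => PySem.Chars.isupper x == k)) ::
      camelRunsB (rest.dropWhile (fun x => PySem.Chars.isupper x == k))
termination_by cs => cs.length
decreasing_by
  simpa using Nat.lt_succ_of_le (List.length_dropWhile_le _ _)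

def camel_case_to_dashed_alt (s : String) : String :=
  String.ofList (pvLstripDash ((camelRunsB s.toList).flatMap
    (fun g => if g.1 then '-' :: PySem.Chars.lower g.2 else g.2)))

-- ===== PRECONDITION & SPEC =====
def Spec_camel_case_to_dashed (s : String) (out : String) : Prop := out = camel_case_to_dashed_alt s
instance (s : String) (out : String) : Decidable (Spec_camel_case_to_dashed s out) := by unfold Spec_camel_case_to_dashed; infer_instance

-- ===== CLAIM (what is proved, stated in full; the proofs are below) =====
def Claim_equal_camel_case_to_dashed : Prop := ∀ (s : String), Dom_camel_case_to_dashed s → Spec_camel_case_to_dashed s (camel_case_to_dashed s)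

-- ===== LEMMAS AND PROOFS =====

-- A's loop body, accumulator-free
def bodyA : List Char → Bool → List Char
  | [], _ => []
  | c :: rest, up =>
    (if PySem.Chars.isupper c then (if up then [] else ['-']) ++ [PySem.Chars.lowerChar c] else [c])
      ++ bodyA rest (PySem.Chars.isupper c)

theorem camelLoopA_eq_bodyA (cs : List Char) : ∀ (acc : List Char) (up : Bool),
    camelLoopA cs acc up = acc ++ bodyA cs up := by
  induction cs with
  | nil => intro acc up; simp [camelLoopA, bodyA]
  | cons c rest ih =>
    intro acc up
    by_cases h : PySem.Chars.isupper c = true <;>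
      simp [camelLoopA, bodyA, h, ih] <;> cases up <;> simp

-- inside an uppercase run with the previous char uppercase: no dash, just lowercase
theorem bodyA_upper_run_true (run : List Char) (hu : ∀ c ∈ run, PySem.Chars.isupper c = true) :
    ∀ rest, bodyA (run ++ rest) true = run.map PySem.Chars.lowerChar ++ bodyA rest true := by
  induction run with
  | nil =>
    intro rest; rcases rest with _ | ⟨d, rest⟩
    · simp
    · simp
  | cons c run ih =>
    intro rest
    have hc := hu c (by simp)
    have ih' := ih (fun x hx => hu x (by simp [hx]))
    by_cases hr : run = []
    · subst hr
      rcases rest with _ | ⟨d, rest⟩ <;> simp [bodyA, hc]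
    · rcases run with _ | ⟨d, run⟩
      · exact absurd rfl hr
      · have hd := hu d (by simp)
        simp [bodyA, hc, hd] at ih' ⊢
        simpa [bodyA, hd] using ih' rest

-- a fresh uppercase run (previous char not uppercase): one dash, then the lowered run
theorem bodyA_upper_run (c : Char) (run rest : List Char)
    (hu : ∀ x ∈ c :: run, PySem.Chars.isupper x = true) :
    bodyA (c :: run ++ rest) false = '-' :: ((c :: run).map PySem.Chars.lowerChar ++ bodyA rest true) := by
  have hc := hu c (by simp)
  have := bodyA_upper_run_true run (fun x hx => hu x (by simp [hx])) rest
  simp [bodyA, hc, this]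

-- a non-uppercase run passes through unchanged, regardless of the incoming state
theorem bodyA_lower_run (c : Char) (run rest : List Char) (up : Bool)
    (hl : ∀ x ∈ c :: run, PySem.Chars.isupper x = false) :
    bodyA (c :: run ++ rest) up = (c :: run) ++ bodyA rest false := by
  induction run generalizing c up with
  | nil => simp [bodyA, hl c (by simp)]
  | cons d run ih =>
    have := ih d false (fun x hx => hl x (by simp at hx ⊢; tauto))
    simp [bodyA, hl c (by simp)] at this ⊢
    simpa [hl d (by simp)] using this

-- the incoming state is irrelevant when the next char is not uppercase (or at the end)
theorem bodyA_true_eq_false (cs : List Char)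
    (h : ∀ x, cs.head? = some x → PySem.Chars.isupper x = false) :
    bodyA cs true = bodyA cs false := by
  rcases cs with _ | ⟨c, rest⟩
  · rfl
  · simp [bodyA, h c rfl]

theorem bodyA_eq_runs (cs : List Char) : bodyA cs false =
    (camelRunsB cs).flatMap (fun g => if g.1 then '-' :: PySem.Chars.lower g.2 else g.2) := by
  induction hn : cs.length using Nat.strong_induction_on generalizing cs with
  | _ n ih =>
    rcases cs with _ | ⟨c, rest⟩
    · simp [camelRunsB, bodyA]
    · set p := fun x => PySem.Chars.isupper x == PySem.Chars.isupper c with hp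
      set run := rest.takeWhile p with hrun
      set tail := rest.dropWhile p with htail
      have hsplit : rest = run ++ tail := (List.takeWhile_append_dropWhile).symm
      have htlen : tail.length < n := by
        subst hn
        simpa [htail] using Nat.lt_succ_of_le (List.length_dropWhile_le p rest)
      have ihtail := ih tail.length htlen tail rfl
      have hhead : ∀ x, tail.head? = some x → PySem.Chars.isupper x = (!PySem.Chars.isupper c) := by
        intro x hx
        have hpx : p x = false := by
          have h0 := List.head?_dropWhile_not p rest
          rw [← htail] at h0
          rw [hx] at h0
          simpa using h0
        rw [hp] at hpx
        exact Bool.eq_not_iff.mpr (by simpa using hpx)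
      have hrunmem : ∀ x ∈ run, PySem.Chars.isupper x = PySem.Chars.isupper c := by
        intro x hx
        have := List.mem_takeWhile_imp (by simpa [hrun] using hx)
        simpa [hp] using this
      have hlower : ∀ (l : List Char), PySem.Chars.lower l = l.map PySem.Chars.lowerChar := by
        intro l; simp [PySem.Chars.lower]
      rw [camelRunsB]
      cases hc : PySem.Chars.isupper c with
      | true =>
        have hup : ∀ x ∈ c :: run, PySem.Chars.isupper x = true := by
          intro x hx; rcases List.mem_cons.mp hx with h | h
          · simpa [h] using hc
          · simpa [hc] using hrunmem x h
        have h1 : bodyA (c :: rest) false = '-' :: ((c :: run).map PySem.Chars.lowerChar ++ bodyA tail true) := by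
          rw [show (c :: rest) = c :: run ++ tail by rw [hsplit]; rfl]
          exact bodyA_upper_run c run tail hup
        have h2 : bodyA tail true = bodyA tail false := by
          apply bodyA_true_eq_false
          intro x hx; simpa [hc] using hhead x hx
        simp only [h1, h2, ihtail, List.flatMap_cons, hlower]
        simp [hrun, htail, hp, hc]
      | false =>
        have hlo : ∀ x ∈ c :: run, PySem.Chars.isupper x = false := by
          intro x hx; rcases List.mem_cons.mp hx with h | h
          · simpa [h] using hc
          · simpa [hc] using hrunmem x h
        have h1 : bodyA (c :: rest) false = (c :: run) ++ bodyA tail false := by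
          rw [show (c :: rest) = c :: run ++ tail by rw [hsplit]; rfl]
          exact bodyA_lower_run c run tail false hlo
        simp only [h1, ihtail, List.flatMap_cons]
        simp [hrun, htail, hp, hc]

-- ===== VERDICT (by name: the statement is the Claim_ definition above) =====
theorem camel_case_to_dashed_spec : Claim_equal_camel_case_to_dashed := by
  intro s _
  unfold Spec_camel_case_to_dashed camel_case_to_dashed camel_case_to_dashed_alt
  rw [camelLoopA_eq_bodyA, bodyA_eq_runs]
  simp
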